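-- pv_equiv track=rewrite | github.com/Raganarayana/final-year-project | train_model.py | pick_positive_label
-- ===== SOURCE A (Python) =====
-- NEGATIVE_NORMAL_KEYS = ["normal", "healthy", "no", "none", "absent", "negative", "low"]
--
-- POSITIVE_STRESS_KEYS = ["stress", "depress", "anxiety", "ill", "disorder", "unhealthy", "positive", "high"]
--
-- def pick_positive_label(classes):
--     lower = [str(c).lower() for c in classes]
--     for i, name in enumerate(lower):
--         if any(k in name for k in POSITIVE_STRESS_KEYS):
--             return classes[i]
--     for i, name in enumerate(lower):
--         if any(k in name for k in NEGATIVE_NORMAL_KEYS) and len(classes) == 2: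
--             return classes[1 - i]
--     return classes[0]
-- ===== SOURCE B (Python) =====
-- NEGATIVE_NORMAL_KEYS = ["normal", "healthy", "no", "none", "absent", "negative", "low"]
--
-- POSITIVE_STRESS_KEYS = ["stress", "depress", "anxiety", "ill", "disorder", "unhealthy", "positive", "high"]
--
-- def pick_positive_label(classes):
--     # one pass: remember the first positive class and the first negative index
--     pos = None
--     neg = None
--     for i, c in enumerate(classes):
--         name = str(c).lower()
--         if pos is None and any(k in name for k in POSITIVE_STRESS_KEYS):
--             pos = c
--         if neg is None and any(k in name for k in NEGATIVE_NORMAL_KEYS):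
--             neg = i
--     if pos is not None:
--         return pos
--     if neg is not None and len(classes) == 2:
--         return classes[1 - neg]
--     return classes[0]
-- ===== Notes on version B (the rewrite author's own statement) =====
-- stated objective: simpler
-- what changed: Replaces A's two sequential index scans over the lowercased names with a single pass that records the first positive class and the first negative index, then decides from those two records.
import Mathlib
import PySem

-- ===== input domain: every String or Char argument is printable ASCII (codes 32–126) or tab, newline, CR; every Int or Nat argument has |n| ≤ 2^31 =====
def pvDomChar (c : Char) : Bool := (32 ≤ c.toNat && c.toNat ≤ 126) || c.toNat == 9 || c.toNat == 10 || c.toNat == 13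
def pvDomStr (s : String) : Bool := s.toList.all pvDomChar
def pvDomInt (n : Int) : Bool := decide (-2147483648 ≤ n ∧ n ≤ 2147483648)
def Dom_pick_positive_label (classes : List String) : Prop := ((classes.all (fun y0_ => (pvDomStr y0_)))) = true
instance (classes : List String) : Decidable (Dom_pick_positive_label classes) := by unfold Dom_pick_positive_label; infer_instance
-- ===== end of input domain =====

-- B replaces A's two sequential index scans with one pass recording the first positive class
-- and the first negative index (objective: simpler). Return value only; no mutation in either program.

-- shared keyword constants of the module
def negativeKeys : List String := ["normal", "healthy", "no", "none", "absent", "negative", "low"]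
def positiveKeys : List String := ["stress", "depress", "anxiety", "ill", "disorder", "unhealthy", "positive", "high"]

-- any(k in name for k in KEYS)
def hasPos (name : String) : Bool := positiveKeys.any (fun k => PySem.Str.isIn k name)
def hasNeg (name : String) : Bool := negativeKeys.any (fun k => PySem.Str.isIn k name)

-- ===== PORT A =====
-- first loop: walks classes and lower in lockstep (classes[i] is the element paired with lower[i])
def scanPos : List String → List String → Option String
  | c :: cs, n :: ns => if hasPos n then some c else scanPos cs ns
  | _, _ => none

-- second loop over enumerate(lower); classes[1-i] is in range whenever the guard len==2 holds
def scanNeg (classes : List String) : List (Int × String) → Option String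
  | [] => none
  | (i, n) :: rest =>
    if hasNeg n && (PySem.List.len classes == 2) then some (PySem.List.pyGetD classes (1 - i) "")
    else scanNeg classes rest

def pick_positive_label (classes : List String) : String :=
  match scanPos classes (classes.map PySem.Str.lower) with
  | some r => r
  | none =>
    match scanNeg classes (PySem.List.enumerate (classes.map PySem.Str.lower) 0) with
    | some r => r
    | none => PySem.List.pyGetD classes 0 ""   -- classes[0]; Pre_ excludes the empty list

-- ===== PORT B =====
-- one pass: first positive class and first negative index
def loopB : List (Int × String) → Option String → Option Int → Option String × Option Int
  | [], pos, neg => (pos, neg)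
  | (i, c) :: rest, pos, neg =>
    let name := PySem.Str.lower c
    loopB rest (if pos.isNone && hasPos name then some c else pos)
               (if neg.isNone && hasNeg name then some i else neg)

def pick_positive_label_alt (classes : List String) : String :=
  match loopB (PySem.List.enumerate classes 0) none none with
  | (some c, _) => c
  | (none, some i) =>
    if PySem.List.len classes == 2 then PySem.List.pyGetD classes (1 - i) ""
    else PySem.List.pyGetD classes 0 ""
  | (none, none) => PySem.List.pyGetD classes 0 ""

-- ===== PRECONDITION & SPEC =====
-- Pre_ excludes only the empty list, on which both A and B raise IndexError (classes[0]).
def Pre_pick_positive_label (classes : List String) : Prop := classes ≠ []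
instance (classes : List String) : Decidable (Pre_pick_positive_label classes) := by unfold Pre_pick_positive_label; infer_instance

def pvWitness_pick_positive_label : List String := ["Stressed", "Normal"]

def Spec_pick_positive_label (classes : List String) (out : String) : Prop := out = pick_positive_label_alt classes
instance (classes : List String) (out : String) : Decidable (Spec_pick_positive_label classes out) := by unfold Spec_pick_positive_label; infer_instance

-- ===== CLAIM (what is proved, stated in full; the proofs are below) =====
def Claim_equal_pick_positive_label : Prop := ∀ (classes : List String), Dom_pick_positive_label classes → Pre_pick_positive_label classes → Spec_pick_positive_label classes (pick_positive_label classes)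

-- ===== LEMMAS AND PROOFS =====

theorem scanPos_map_lower (cs : List String) :
    scanPos cs (cs.map PySem.Str.lower) = cs.find? (fun c => hasPos (PySem.Str.lower c)) := by
  induction cs with
  | nil => rfl
  | cons c cs ih =>
    simp only [List.map_cons, scanPos, List.find?]
    by_cases h : hasPos (PySem.Str.lower c) <;> simp [h, ih]

theorem scanNeg_of_len_ne_two (classes : List String) (h : classes.length ≠ 2)
    (l : List (Int × String)) : scanNeg classes l = none := by
  induction l with
  | nil => rfl
  | cons p rest ih =>
    obtain ⟨i, n⟩ := p
    simp only [scanNeg, PySem.List.len, ih]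
    split_ifs with hg
    · exfalso
      simp only [Bool.and_eq_true, beq_iff_eq] at hg
      exact h (by exact_mod_cast hg.2)
    · rfl

theorem loopB_fst_some (l : List (Int × String)) (a : String) (neg : Option Int) :
    (loopB l (some a) neg).1 = some a := by
  induction l generalizing neg with
  | nil => rfl
  | cons p rest ih => obtain ⟨i, c⟩ := p; simp [loopB, ih]

theorem loopB_fst (l : List (Int × String)) (neg : Option Int) :
    (loopB l none neg).1 = (l.find? (fun p => hasPos (PySem.Str.lower p.2))).map (·.2) := by
  induction l generalizing neg with
  | nil => rfl
  | cons p rest ih =>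
    obtain ⟨i, c⟩ := p
    simp only [loopB, List.find?]
    by_cases h : hasPos (PySem.Str.lower c) <;> simp [h, ih, loopB_fst_some]

-- first-positive found on each side agrees
theorem fst_loopB_enumerate (classes : List String) :
    (loopB (PySem.List.enumerate classes 0) none none).1
      = classes.find? (fun c => hasPos (PySem.Str.lower c)) := by
  rw [loopB_fst]
  have h := PySem.List.map_snd_enumerate (xs := classes) (s := 0)
  rw [show (fun p : Int × String => hasPos (PySem.Str.lower p.2))
        = ((fun c => hasPos (PySem.Str.lower c)) ∘ (fun p : Int × String => p.2)) from rfl,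
      ← List.find?_map, h]

-- ===== VERDICT (by name: the statement is the Claim_ definition above) =====
theorem pick_positive_label_spec : Claim_equal_pick_positive_label := by
  intro classes _ hpre
  unfold Spec_pick_positive_label pick_positive_label pick_positive_label_alt
  rw [scanPos_map_lower]
  have hfst := fst_loopB_enumerate classes
  cases hp : classes.find? (fun c => hasPos (PySem.Str.lower c)) with
  | some c =>
    rw [hp] at hfst
    rw [show loopB (PySem.List.enumerate classes 0) none none
          = (some c, (loopB (PySem.List.enumerate classes 0) none none).2) from
        Prod.ext hfst rfl]
  | none =>
    rw [hp] at hfst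
    have hall := List.find?_eq_none.mp hp
    by_cases hlen : classes.length = 2
    · -- length is 2: classes = [a, b]; compute both sides concretely
      match classes, hlen with
      | [a, b], _ =>
        have hfa : hasPos (PySem.Str.lower a) = false := by
          simpa using hall a (by simp)
        have hfb : hasPos (PySem.Str.lower b) = false := by
          simpa using hall b (by simp)
        by_cases hna : hasNeg (PySem.Str.lower a) = true
        · simp [loopB, scanNeg, PySem.List.enumerate_cons, PySem.List.enumerate_nil,
            hfa, hfb, hna, PySem.List.len, PySem.List.pyGetD, PySem.List.pyGet?,
            PySem.List.pyIdx?]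
        · by_cases hnb : hasNeg (PySem.Str.lower b) = true
          · simp [loopB, scanNeg, PySem.List.enumerate_cons, PySem.List.enumerate_nil,
              hfa, hfb, Bool.eq_false_iff.mpr hna, hnb, PySem.List.len, PySem.List.pyGetD,
              PySem.List.pyGet?, PySem.List.pyIdx?]
          · simp [loopB, scanNeg, PySem.List.enumerate_cons, PySem.List.enumerate_nil,
              hfa, hfb, Bool.eq_false_iff.mpr hna, Bool.eq_false_iff.mpr hnb,
              PySem.List.len, PySem.List.pyGetD, PySem.List.pyGet?, PySem.List.pyIdx?]
    · -- length ≠ 2: both sides fall through to classes[0]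
      rw [scanNeg_of_len_ne_two classes hlen]
      rw [show loopB (PySem.List.enumerate classes 0) none none
            = (none, (loopB (PySem.List.enumerate classes 0) none none).2) from
          Prod.ext hfst rfl]
      cases (loopB (PySem.List.enumerate classes 0) none none).2 with
      | none => rfl
      | some i =>
        simp only []
        have hl : ¬ (PySem.List.len classes == 2) = true := by
          simp only [PySem.List.len, beq_iff_eq]
          exact fun h => hlen (by exact_mod_cast h)
        rw [if_neg hl]
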